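-- pv_equiv track=rewrite | github.com/pnheinsohn/IIC2233-PrograAvanzada | pnheinsohn-iic2233-2017-2/Tareas/T04/Functions.py | go_people_kwargs
-- ===== SOURCE A (Python) =====
-- def go_people_kwargs(row, entity, first_filter):  # Get kwarg values for instantiate classes
--     kwargs = {}
--     for i in range(len(first_filter[0])):
--         if first_filter[0][i].lower() == "nombre":
--             kwargs.update({"name": row[i]})
--         elif first_filter[0][i].lower() == "apellido":
--             kwargs.update({"last_name": row[i]})
--         elif first_filter[0][i].lower() == "edad":
--             kwargs.update({"age": row[i]})
--     if entity == "Alumno" or entity == "Funcionario":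
--         for i in range(len(first_filter[0])):
--             if first_filter[0][i] == "Vendedores de Preferencia":
--                 kwargs.update({"best_sellers": row[i]})
--     elif entity == "Vendedor":
--         for i in range(len(first_filter[0])):
--             if first_filter[0][i] == "Tipo Comida":
--                 kwargs.update({"food_type": row[i][:-1]})
--     elif entity == "Carabinero":
--         for i in range(len(first_filter[0])):
--             if first_filter[0][i] == "Personalidad":
--                 kwargs.update({"personality": row[i]})
--     return kwargs
-- ===== SOURCE B (Python) =====
-- def go_people_kwargs(row, entity, first_filter):
--     # One table-driven pass over the header row instead of A's two scans.
--     headers = first_filter[0]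
--     base = {"nombre": "name", "apellido": "last_name", "edad": "age"}
--     special = {
--         "Alumno": ("Vendedores de Preferencia", "best_sellers", False),
--         "Funcionario": ("Vendedores de Preferencia", "best_sellers", False),
--         "Vendedor": ("Tipo Comida", "food_type", True),
--         "Carabinero": ("Personalidad", "personality", False),
--     }
--     sp = special.get(entity)
--     kwargs = {}
--     extra = None
--     for i, h in enumerate(headers):
--         key = base.get(h.lower())
--         if key is not None:
--             kwargs[key] = row[i]
--         if sp is not None and h == sp[0]:
--             extra = (sp[1], row[i][:-1] if sp[2] else row[i])
--     if extra is not None: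
--         kwargs[extra[0]] = extra[1]
--     return kwargs
-- ===== Notes on version B (the rewrite author's own statement) =====
-- stated objective: simpler
-- what changed: A's two separate scans of the header row (an if/elif chain for the three name fields, then an entity-dispatched second scan) are replaced by one table-driven pass that looks each header up in a lowercase-keyed base table and an entity table, recording the entity-specific entry separately and appending it once at the end.
import Mathlib
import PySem

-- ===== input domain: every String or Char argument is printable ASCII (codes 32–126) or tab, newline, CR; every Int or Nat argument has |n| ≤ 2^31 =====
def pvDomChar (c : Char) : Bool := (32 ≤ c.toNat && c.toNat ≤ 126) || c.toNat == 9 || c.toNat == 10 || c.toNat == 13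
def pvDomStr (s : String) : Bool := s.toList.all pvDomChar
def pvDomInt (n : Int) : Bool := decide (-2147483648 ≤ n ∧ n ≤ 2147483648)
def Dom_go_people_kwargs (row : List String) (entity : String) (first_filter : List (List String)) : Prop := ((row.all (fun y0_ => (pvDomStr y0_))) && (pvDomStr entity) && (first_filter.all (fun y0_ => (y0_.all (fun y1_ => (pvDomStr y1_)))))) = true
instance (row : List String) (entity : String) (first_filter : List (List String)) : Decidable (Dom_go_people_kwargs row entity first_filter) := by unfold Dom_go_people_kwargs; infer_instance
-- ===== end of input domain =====

-- B replaces A's two scans of the header row by one table-driven pass; objective: simpler.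
-- ===== PORT A =====
-- A's first loop body: the nombre/apellido/edad if/elif chain.
def pvStepName (row : List String) (d : PySem.Dict String String) (p : Int × String) : PySem.Dict String String :=
  if PySem.Str.lower p.2 == "nombre" then d.insert "name" (PySem.List.pyGetD row p.1 "")
  else if PySem.Str.lower p.2 == "apellido" then d.insert "last_name" (PySem.List.pyGetD row p.1 "")
  else if PySem.Str.lower p.2 == "edad" then d.insert "age" (PySem.List.pyGetD row p.1 "")
  else d

def go_people_kwargs (row : List String) (entity : String) (first_filter : List (List String)) : List (String × String) :=
  let headers := first_filter.headD []
  let ps := PySem.List.enumerate headers 0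
  let kwargs := ps.foldl (pvStepName row) PySem.Dict.empty
  let kwargs :=
    if entity == "Alumno" || entity == "Funcionario" then
      ps.foldl (fun d p => if p.2 == "Vendedores de Preferencia" then d.insert "best_sellers" (PySem.List.pyGetD row p.1 "") else d) kwargs
    else if entity == "Vendedor" then
      ps.foldl (fun d p => if p.2 == "Tipo Comida" then d.insert "food_type" (PySem.Str.slice (PySem.List.pyGetD row p.1 "") none (some (-1))) else d) kwargs
    else if entity == "Carabinero" then
      ps.foldl (fun d p => if p.2 == "Personalidad" then d.insert "personality" (PySem.List.pyGetD row p.1 "") else d) kwargs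
    else kwargs
  kwargs.items

-- ===== PORT B =====
def pvBase : PySem.Dict String String :=
  PySem.Dict.ofList [("nombre", "name"), ("apellido", "last_name"), ("edad", "age")]

def pvSpecial : PySem.Dict String (String × String × Bool) :=
  PySem.Dict.ofList [("Alumno", ("Vendedores de Preferencia", "best_sellers", false)),
                     ("Funcionario", ("Vendedores de Preferencia", "best_sellers", false)),
                     ("Vendedor", ("Tipo Comida", "food_type", true)),
                     ("Carabinero", ("Personalidad", "personality", false))]

-- B's single loop body: base-table lookup on the lowered header, entity-table match recorded in st.2.
def pvStepB (row : List String) (sp : Option (String × String × Bool))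
    (st : PySem.Dict String String × Option (String × String)) (p : Int × String) :
    PySem.Dict String String × Option (String × String) :=
  let st1 := match pvBase.get? (PySem.Str.lower p.2) with
    | some k => (st.1.insert k (PySem.List.pyGetD row p.1 ""), st.2)
    | none => st
  match sp with
  | some s =>
      if p.2 == s.1 then
        (st1.1, some (s.2.1, if s.2.2 then PySem.Str.slice (PySem.List.pyGetD row p.1 "") none (some (-1)) else PySem.List.pyGetD row p.1 ""))
      else st1
  | none => st1

-- Source B's trailing "if extra is not None: kwargs[extra[0]] = extra[1]".
def pvApply (e : Option (String × String)) (d : PySem.Dict String String) : PySem.Dict String String :=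
  match e with
  | some kv => d.insert kv.1 kv.2
  | none => d

def go_people_kwargs_alt (row : List String) (entity : String) (first_filter : List (List String)) : List (String × String) :=
  let headers := first_filter.headD []
  let sp := pvSpecial.get? entity
  let st := (PySem.List.enumerate headers 0).foldl (pvStepB row sp) (PySem.Dict.empty, none)
  (pvApply st.2 st.1).items

-- ===== PRECONDITION & SPEC =====
-- Pre_ excludes exactly the inputs where Python A raises: empty first_filter (IndexError on
-- first_filter[0]) and rows too short at an index whose header matches one of the looked-up names
-- (IndexError on row[i]).
def Pre_go_people_kwargs (row : List String) (entity : String) (first_filter : List (List String)) : Prop :=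
  first_filter ≠ [] ∧ ∀ p ∈ PySem.List.enumerate (first_filter.headD []) 0,
    ((PySem.Str.lower p.2 = "nombre" ∨ PySem.Str.lower p.2 = "apellido" ∨ PySem.Str.lower p.2 = "edad") → PySem.Raise.InRange row.length p.1) ∧
    ((entity = "Alumno" ∨ entity = "Funcionario") → p.2 = "Vendedores de Preferencia" → PySem.Raise.InRange row.length p.1) ∧
    (entity = "Vendedor" → p.2 = "Tipo Comida" → PySem.Raise.InRange row.length p.1) ∧
    (entity = "Carabinero" → p.2 = "Personalidad" → PySem.Raise.InRange row.length p.1)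

instance (row : List String) (entity : String) (first_filter : List (List String)) : Decidable (Pre_go_people_kwargs row entity first_filter) := by unfold Pre_go_people_kwargs; infer_instance

def pvWitness_go_people_kwargs : List String × String × List (List String) :=
  (["Juan", "Soto", "19"], "Alumno", [["Nombre", "Apellido", "Edad"]])

def Spec_go_people_kwargs (row : List String) (entity : String) (first_filter : List (List String)) (out : List (String × String)) : Prop := out = go_people_kwargs_alt row entity first_filter
instance (row : List String) (entity : String) (first_filter : List (List String)) (out : List (String × String)) : Decidable (Spec_go_people_kwargs row entity first_filter out) := by unfold Spec_go_people_kwargs; infer_instance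

-- ===== CLAIM (what is proved, stated in full; the proofs are below) =====
def Claim_equal_go_people_kwargs : Prop := ∀ (row : List String) (entity : String) (first_filter : List (List String)), Dom_go_people_kwargs row entity first_filter → Pre_go_people_kwargs row entity first_filter → Spec_go_people_kwargs row entity first_filter (go_people_kwargs row entity first_filter)

-- ===== LEMMAS AND PROOFS =====
-- The entity-tracking component of B's loop, in isolation.
def pvExtraStep (row : List String) (sp : Option (String × String × Bool))
    (e : Option (String × String)) (p : Int × String) : Option (String × String) :=
  match sp with
  | some s =>
      if p.2 == s.1 then
        some (s.2.1, if s.2.2 then PySem.Str.slice (PySem.List.pyGetD row p.1 "") none (some (-1)) else PySem.List.pyGetD row p.1 "")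
      else e
  | none => e

theorem pvBase_get (s : String) : pvBase.get? s =
    (if s = "nombre" then some "name" else if s = "apellido" then some "last_name"
     else if s = "edad" then some "age" else none) := by
  have hmk : pvBase = PySem.Dict.mk [("nombre", "name"), ("apellido", "last_name"), ("edad", "age")] := by decide
  rw [hmk]
  by_cases h1 : s = "nombre"
  · subst h1; rfl
  by_cases h2 : s = "apellido"
  · subst h2; rfl
  by_cases h3 : s = "edad"
  · subst h3; rfl
  have hnil : ({ items := [] } : PySem.Dict String String).get? s = none := rfl
  simp [PySem.Dict.get?_mk_cons, h1, h2, h3, Ne.symm h1, Ne.symm h2, Ne.symm h3, hnil]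

theorem pvStepB_eq (row : List String) (sp : Option (String × String × Bool))
    (st : PySem.Dict String String × Option (String × String)) (p : Int × String) :
    pvStepB row sp st p = (pvStepName row st.1 p, pvExtraStep row sp st.2 p) := by
  have hbody : (match pvBase.get? (PySem.Str.lower p.2) with
      | some k => (st.1.insert k (PySem.List.pyGetD row p.1 ""), st.2)
      | none => st)
      = (pvStepName row st.1 p, st.2) := by
    rw [pvBase_get]
    unfold pvStepName
    by_cases h1 : PySem.Str.lower p.2 = "nombre" <;>
      by_cases h2 : PySem.Str.lower p.2 = "apellido" <;>
        by_cases h3 : PySem.Str.lower p.2 = "edad" <;>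
          simp [h1, h2, h3]
  cases sp with
  | none => simpa [pvStepB, pvExtraStep] using hbody
  | some s =>
    simp only [pvStepB, hbody, pvExtraStep]
    by_cases hc : p.2 = s.1
    · simp [hc]
    · simp [hc]

theorem pvFoldB (row : List String) (sp : Option (String × String × Bool)) :
    ∀ (ps : List (Int × String)) (st : PySem.Dict String String × Option (String × String)),
      ps.foldl (pvStepB row sp) st = (ps.foldl (pvStepName row) st.1, ps.foldl (pvExtraStep row sp) st.2) := by
  intro ps
  induction ps with
  | nil => intro st; rfl
  | cons p t ih => intro st; simp [List.foldl, pvStepB_eq, ih]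

theorem pvFoldA2_apply (hdr key : String) (mkv : Int × String → String) :
    ∀ (ps : List (Int × String)) (e : Option (String × String)) (d : PySem.Dict String String),
      (∀ kv, e = some kv → kv.1 = key) →
      ps.foldl (fun d p => if p.2 == hdr then d.insert key (mkv p) else d) (pvApply e d)
        = pvApply (ps.foldl (fun e p => if p.2 == hdr then some (key, mkv p) else e) e) d := by
  intro ps
  induction ps with
  | nil => intro e d _; rfl
  | cons p t ih =>
    intro e d he
    by_cases hc : p.2 = hdr
    · have hstep : (pvApply e d).insert key (mkv p) = pvApply (some (key, mkv p)) d := by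
        cases e with
        | none => rfl
        | some kv =>
          have hk : kv.1 = key := he kv rfl
          simp [pvApply, hk, PySem.Dict.insert_insert_self]
      have hcb : (p.2 == hdr) = true := by simpa using hc
      simp only [List.foldl, hcb, if_true, hstep]
      exact ih (some (key, mkv p)) d (by intro kv h; cases h; rfl)
    · have hcb : (p.2 == hdr) = false := by simpa using hc
      simp only [List.foldl, hcb, Bool.false_eq_true, if_false]
      exact ih e d he

-- The special-entity case of the main proof, shared by the four entities.
theorem pvSpecialCase (row : List String) (ps : List (Int × String)) (hdr key : String)
    (mkv : Int × String → String) :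
    (ps.foldl (fun d p => if p.2 == hdr then d.insert key (mkv p) else d)
        (ps.foldl (pvStepName row) PySem.Dict.empty)).items
      = (pvApply
          (ps.foldl (fun e p => if p.2 == hdr then some (key, mkv p) else e) none)
          (ps.foldl (pvStepName row) PySem.Dict.empty)).items := by
  have h := pvFoldA2_apply hdr key mkv ps none (ps.foldl (pvStepName row) PySem.Dict.empty)
    (by intro kv h; cases h)
  rw [show pvApply none (ps.foldl (pvStepName row) PySem.Dict.empty)
        = ps.foldl (pvStepName row) PySem.Dict.empty from rfl] at h
  rw [h]

-- ===== VERDICT (by name: the statement is the Claim_ definition above) =====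
theorem go_people_kwargs_spec : Claim_equal_go_people_kwargs := by
  intro row entity first_filter _ _
  unfold Spec_go_people_kwargs go_people_kwargs go_people_kwargs_alt
  simp only [pvFoldB]
  by_cases hA : entity = "Alumno"
  · subst hA
    rw [show pvSpecial.get? "Alumno" = some ("Vendedores de Preferencia", "best_sellers", false) from by decide]
    exact pvSpecialCase row _ "Vendedores de Preferencia" "best_sellers"
      (fun p => PySem.List.pyGetD row p.1 "")
  by_cases hF : entity = "Funcionario"
  · subst hF
    rw [show pvSpecial.get? "Funcionario" = some ("Vendedores de Preferencia", "best_sellers", false) from by decide]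
    exact pvSpecialCase row _ "Vendedores de Preferencia" "best_sellers"
      (fun p => PySem.List.pyGetD row p.1 "")
  by_cases hV : entity = "Vendedor"
  · subst hV
    rw [show pvSpecial.get? "Vendedor" = some ("Tipo Comida", "food_type", true) from by decide]
    exact pvSpecialCase row _ "Tipo Comida" "food_type"
      (fun p => PySem.Str.slice (PySem.List.pyGetD row p.1 "") none (some (-1)))
  by_cases hC : entity = "Carabinero"
  · subst hC
    rw [show pvSpecial.get? "Carabinero" = some ("Personalidad", "personality", false) from by decide]
    exact pvSpecialCase row _ "Personalidad" "personality"
      (fun p => PySem.List.pyGetD row p.1 "")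
  · have hsp : pvSpecial.get? entity = none := by
      have hnil : ({ items := [] } : PySem.Dict String (String × String × Bool)).get? entity = none := rfl
      rw [show pvSpecial = PySem.Dict.mk
            [("Alumno", ("Vendedores de Preferencia", "best_sellers", false)),
             ("Funcionario", ("Vendedores de Preferencia", "best_sellers", false)),
             ("Vendedor", ("Tipo Comida", "food_type", true)),
             ("Carabinero", ("Personalidad", "personality", false))] from by decide]
      simp [PySem.Dict.get?_mk_cons, Ne.symm hA, Ne.symm hF, Ne.symm hV, Ne.symm hC, hnil]
    rw [hsp]
    have hnone : ∀ l : List (Int × String),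
        List.foldl (pvExtraStep row none) (none : Option (String × String)) l = none := by
      intro l
      induction l with
      | nil => rfl
      | cons q t iht => simpa [pvExtraStep] using iht
    rw [hnone]
    have c1 : (entity == "Alumno" || entity == "Funcionario") = false := by simp [hA, hF]
    have c2 : (entity == "Vendedor") = false := by simp [hV]
    have c3 : (entity == "Carabinero") = false := by simp [hC]
    simp only [c1, c2, c3, Bool.false_eq_true, if_false, pvApply]
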